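-- pv_equiv track=rewrite | github.com/iagooteroc/spark_ml | Data_transform.py | arreglaComas
-- ===== SOURCE A (Python) =====
-- def arreglaComas(x):
--     nx=""
--     numComillas=0
--     for l in x:
--         if l=='\"':
--             numComillas+=1
--         elif l==",":
--             if numComillas%2==0:
--                 nx+=l
--             else:
--                 nx+=";"
--         else:
--             nx+=l
--     return nx
-- ===== SOURCE B (Python) =====
-- def arreglaComas(x):
--     parts = x.split('"')
--     out = []
--     for i, p in enumerate(parts):
--         out.append(p.replace(',', ';') if i % 2 != 0 else p)
--     return ''.join(out)
-- ===== Notes on version B (the rewrite author's own statement) =====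
-- stated objective: faster
-- what changed: Replaces the char-by-char loop with a manual quote-parity counter and quadratic string += by the idiomatic split-on-quote / replace commas in odd segments / str.join decomposition.
import Mathlib
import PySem

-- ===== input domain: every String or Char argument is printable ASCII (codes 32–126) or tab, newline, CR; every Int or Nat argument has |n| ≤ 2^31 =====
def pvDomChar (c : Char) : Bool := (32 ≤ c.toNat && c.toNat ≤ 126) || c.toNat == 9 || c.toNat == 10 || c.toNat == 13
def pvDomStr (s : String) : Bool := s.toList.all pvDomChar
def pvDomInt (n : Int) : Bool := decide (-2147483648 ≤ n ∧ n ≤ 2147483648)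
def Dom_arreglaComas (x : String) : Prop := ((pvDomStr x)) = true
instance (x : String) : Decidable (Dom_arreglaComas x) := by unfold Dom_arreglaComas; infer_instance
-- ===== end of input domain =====

-- B replaces A's char-by-char loop with a quote-parity counter by the idiomatic
-- split-on-quote / replace commas in odd segments / join decomposition.


-- ===== PORT A =====
/-- One iteration of A's loop body: state is (nx, numComillas). -/
def aStep (s : List Char × Int) (l : Char) : List Char × Int :=
  if l = '"' then (s.1, s.2 + 1)
  else if l = ',' then
    if PySem.Int.mod s.2 2 = 0 then (s.1 ++ [l], s.2) else (s.1 ++ [';'], s.2)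
  else (s.1 ++ [l], s.2)

def arreglaComas (x : String) : String :=
  let st := x.toList.foldl aStep ([], 0)
  String.ofList st.1

-- ===== PORT B =====
def arreglaComas_alt (x : String) : String :=
  let parts := PySem.Chars.splitOn x.toList ['"']
  let out := (PySem.List.enumerate parts).map
    (fun ip => if PySem.Int.mod ip.1 2 ≠ 0 then PySem.Chars.replace ip.2 [','] [';'] else ip.2)
  String.ofList (PySem.Chars.join [] out)

-- ===== PRECONDITION & SPEC =====
def Spec_arreglaComas (x : String) (out : String) : Prop := out = arreglaComas_alt x
instance (x : String) (out : String) : Decidable (Spec_arreglaComas x out) := by unfold Spec_arreglaComas; infer_instance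

-- ===== CLAIM (what is proved, stated in full; the proofs are below) =====
def Claim_equal_arreglaComas : Prop := ∀ (x : String), Dom_arreglaComas x → Spec_arreglaComas x (arreglaComas x)

-- ===== LEMMAS AND PROOFS =====

/-- `if c = ',' then ';' else c` — the effect of `.replace(',', ';')` on one char. -/
def fComma (c : Char) : Char := if c = ',' then ';' else c

/-- The intended result, parametrised by the current quote parity. -/
def outProc : List Char → Bool → List Char
  | [], _ => []
  | c :: t, b =>
    if c = '"' then outProc t (!b)
    else (if c = ',' && b then ';' else c) :: outProc t b

/-- Splitting on `'"'`, with the (reversed) current segment as accumulator. -/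
def spl : List Char → List Char → List (List Char)
  | [], cur => [cur.reverse]
  | c :: t, cur => if c = '"' then cur.reverse :: spl t [] else spl t (c :: cur)

/-- Process a list of segments: map `fComma` over the odd-parity ones, concatenate. -/
def procParts : Bool → List (List Char) → List Char
  | _, [] => []
  | b, p :: ps => (if b then p.map fComma else p) ++ procParts (!b) ps

theorem parityFlip (k : Int) :
    (decide (PySem.Int.mod (k + 1) 2 ≠ 0)) = !(decide (PySem.Int.mod k 2 ≠ 0)) := by
  simp only [PySem.Int.mod, Int.fmod_eq_emod, decide_not, Bool.not_not]
  by_cases h : (k + 1) % 2 = 0 <;> simp [h] <;> omega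

theorem replaceGo (fuel : Nat) (cs acc : List Char) (h : cs.length ≤ fuel) :
    PySem.Chars.replace.go [','] [';'] fuel cs acc = acc.reverse ++ cs.map fComma := by
  induction fuel generalizing cs acc with
  | zero =>
    have : cs = [] := List.length_eq_zero_iff.mp (Nat.le_zero.mp h)
    subst this; simp [PySem.Chars.replace.go]
  | succ n ih =>
    cases cs with
    | nil => simp [PySem.Chars.replace.go]
    | cons c t =>
      simp only [PySem.Chars.replace.go]
      by_cases hc : c = ','
      · subst hc
        have hp : ([','].isPrefixOf (',' :: t)) = true := by simp [List.isPrefixOf]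
        rw [hp]
        simp only [reduceIte]
        rw [show List.drop [','].length (',' :: t) = t from rfl]
        rw [ih t ([';'].reverse ++ acc) (Nat.succ_le_succ_iff.mp (by simpa using h))]
        simp [fComma]
      · have hp : ([','].isPrefixOf (c :: t)) = false := by
          simp [List.isPrefixOf]; exact fun hcc => hc (by simpa using hcc.symm)
        rw [hp]
        simp only [Bool.false_eq_true, if_false]
        rw [ih t (c :: acc) (Nat.succ_le_succ_iff.mp (by simpa using h))]
        simp [fComma, hc]

theorem replace_single (cs : List Char) :
    PySem.Chars.replace cs [','] [';'] = cs.map fComma := by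
  simp only [PySem.Chars.replace, List.isEmpty_cons, Bool.false_eq_true, if_false]
  simpa using replaceGo cs.length cs [] le_rfl

theorem splitGo (fuel : Nat) (cs cur : List Char) (acc : List (List Char)) (h : cs.length ≤ fuel) :
    PySem.Chars.splitOn.go ['"'] fuel cs cur acc = acc.reverse ++ spl cs cur := by
  induction fuel generalizing cs cur acc with
  | zero =>
    have : cs = [] := List.length_eq_zero_iff.mp (Nat.le_zero.mp h)
    subst this; simp [PySem.Chars.splitOn.go, spl]
  | succ n ih =>
    cases cs with
    | nil => simp [PySem.Chars.splitOn.go, spl]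
    | cons c t =>
      simp only [PySem.Chars.splitOn.go, spl]
      by_cases hc : c = '"'
      · subst hc
        have hp : (['"'].isPrefixOf ('"' :: t)) = true := by simp [List.isPrefixOf]
        rw [hp]
        simp only [reduceIte]
        rw [show List.drop ['"'].length ('"' :: t) = t from rfl]
        rw [ih t [] (cur.reverse :: acc) (Nat.succ_le_succ_iff.mp (by simpa using h))]
        simp
      · have hp : (['"'].isPrefixOf (c :: t)) = false := by
          simp [List.isPrefixOf]; exact fun hcc => hc (by simpa using hcc.symm)
        rw [hp]
        simp only [Bool.false_eq_true, if_false, hc]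
        exact ih t (c :: cur) acc (Nat.succ_le_succ_iff.mp (by simpa using h))

theorem splitOn_eq_spl (cs : List Char) :
    PySem.Chars.splitOn cs ['"'] = spl cs [] := by
  simpa using splitGo (cs.length + 1) cs [] [] (Nat.le_succ _)

theorem joinNil (ps : List (List Char)) : PySem.Chars.join [] ps = ps.flatten := by
  induction ps with
  | nil => simp [PySem.Chars.join_nil]
  | cons p ps ih =>
    cases ps with
    | nil => simp [PySem.Chars.join_singleton]
    | cons q rest => rw [PySem.Chars.join_cons_cons]; simp [ih]

theorem enumFlat (parts : List (List Char)) (n : Int) :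
    ((PySem.List.enumerate parts n).map
      (fun ip => if PySem.Int.mod ip.1 2 ≠ 0 then PySem.Chars.replace ip.2 [','] [';'] else ip.2)).flatten
    = procParts (decide (PySem.Int.mod n 2 ≠ 0)) parts := by
  induction parts generalizing n with
  | nil => simp [PySem.List.enumerate_nil, procParts]
  | cons p ps ih =>
    rw [PySem.List.enumerate_cons]
    simp only [List.map_cons, List.flatten_cons, ih (n + 1), parityFlip, procParts]
    rw [replace_single]
    by_cases h : PySem.Int.mod n 2 ≠ 0
    · simp [h]
    · simp [h]

theorem procParts_cons (b : Bool) (p : List Char) (ps : List (List Char)) :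
    procParts b (p :: ps) = (if b then p.map fComma else p) ++ procParts (!b) ps := by
  cases b <;> rfl

theorem outProc_quote (t : List Char) (b : Bool) : outProc ('"' :: t) b = outProc t (!b) := by
  cases b <;> rfl

theorem outProc_comma (t : List Char) (b : Bool) :
    outProc (',' :: t) b = (if b then ';' else ',') :: outProc t b := by
  cases b <;> rfl

theorem outProc_other {c : Char} (hc : c ≠ '"') (hcm : c ≠ ',') (t : List Char) (b : Bool) :
    outProc (c :: t) b = c :: outProc t b := by
  cases b <;> simp [outProc, hc, hcm]

theorem splProc (cs : List Char) (cur : List Char) (b : Bool) :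
    procParts b (spl cs cur)
    = (if b then cur.reverse.map fComma else cur.reverse) ++ outProc cs b := by
  induction cs generalizing cur b with
  | nil => simp [spl, procParts, outProc]
  | cons c t ih =>
    simp only [spl]
    by_cases hc : c = '"'
    · subst hc
      rw [if_pos rfl, procParts_cons, ih [] (!b), outProc_quote]
      simp
    · rw [if_neg hc, ih (c :: cur) b]
      by_cases hcm : c = ','
      · subst hcm
        rw [outProc_comma]
        cases b <;> simp [fComma, List.append_assoc]
      · rw [outProc_other hc hcm]
        cases b <;> simp [fComma, hcm, List.append_assoc]

theorem aStep_quote (s : List Char × Int) : aStep s '"' = (s.1, s.2 + 1) := rfl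

theorem aStep_comma (s : List Char × Int) :
    aStep s ',' = if PySem.Int.mod s.2 2 = 0 then (s.1 ++ [','], s.2) else (s.1 ++ [';'], s.2) := rfl

theorem aStep_other {c : Char} (hc : c ≠ '"') (hcm : c ≠ ',') (s : List Char × Int) :
    aStep s c = (s.1 ++ [c], s.2) := by
  simp [aStep, hc, hcm]

theorem aFold (cs : List Char) (nx : List Char) (k : Int) :
    (cs.foldl aStep (nx, k)).1 = nx ++ outProc cs (decide (PySem.Int.mod k 2 ≠ 0)) := by
  induction cs generalizing nx k with
  | nil => simp [outProc]
  | cons c t ih =>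
    by_cases hc : c = '"'
    · subst hc
      rw [List.foldl_cons, aStep_quote, ih, parityFlip, outProc_quote]
    · by_cases hcm : c = ','
      · subst hcm
        rw [List.foldl_cons, aStep_comma]
        by_cases hk : PySem.Int.mod k 2 = 0
        · have hd : (decide (PySem.Int.mod k 2 ≠ 0)) = false := by
            rw [decide_eq_false_iff_not]; simp only [ne_eq, not_not]; exact hk
          rw [if_pos hk, ih, hd, outProc_comma]
          simp [List.append_assoc]
        · have hd : (decide (PySem.Int.mod k 2 ≠ 0)) = true := by
            rw [decide_eq_true_iff]; exact hk
          rw [if_neg hk, ih, hd, outProc_comma]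
          simp [List.append_assoc]
      · rw [List.foldl_cons, aStep_other hc hcm, ih, outProc_other hc hcm]
        simp [List.append_assoc]

-- ===== VERDICT (by name: the statement is the Claim_ definition above) =====
theorem arreglaComas_spec : Claim_equal_arreglaComas := by
  intro x _
  show arreglaComas x = arreglaComas_alt x
  simp only [arreglaComas, arreglaComas_alt]
  rw [aFold, splitOn_eq_spl, joinNil, enumFlat, splProc]
  norm_num [PySem.Int.mod, Int.fmod_eq_emod]
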